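-- pv_equiv track=rewrite | github.com/AzyzHm/CodeForces-Problems- | python/Strong Password.py | solve
-- ===== SOURCE A (Python) =====
-- def add_random(s,pred,succ):
--     alpha = 'abcdefghijklmnopqrstuvwxyz'
--     for i in alpha:
--         if i != pred and i != succ:
--             s += i
--             break
--     return s
--
-- def solve(s):
--     new_string = ''
--     if len(s) == 1:
--         new_string += s
--         new_string = add_random(new_string,s,'')
--     else:
--         for i in range(len(s)-1):
--             if s[i]==s[i+1]:
--                 new_string += s[i]
--                 new_string = add_random(new_string,s[i],s[i+1])
--                 new_string += s[i+1:]
--                 break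
--             else:
--                 new_string += s[i]
--         if len(new_string) != len(s)+1:
--             new_string += s[-1]
--             new_string = add_random(new_string,s[-1],'')
--     return new_string
-- ===== SOURCE B (Python) =====
-- def solve(s):
--     for j, (a, b) in enumerate(zip(s, s[1:])):
--         if a == b:
--             sep = 'b' if a == 'a' else 'a'
--             return s[:j + 1] + sep + s[j + 1:]
--     c = s[-1]
--     return s + ('b' if c == 'a' else 'a')
-- ===== Notes on version B (the rewrite author's own statement) =====
-- stated objective: simpler
-- what changed: B drops A's char-by-char accumulator with its length-comparison break flag and the 26-letter search loop, using instead a single zip scan that returns immediately via slicing, with the inserted letter computed in closed form (letter b if the neighbour is letter a, else letter a).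
import Mathlib
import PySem

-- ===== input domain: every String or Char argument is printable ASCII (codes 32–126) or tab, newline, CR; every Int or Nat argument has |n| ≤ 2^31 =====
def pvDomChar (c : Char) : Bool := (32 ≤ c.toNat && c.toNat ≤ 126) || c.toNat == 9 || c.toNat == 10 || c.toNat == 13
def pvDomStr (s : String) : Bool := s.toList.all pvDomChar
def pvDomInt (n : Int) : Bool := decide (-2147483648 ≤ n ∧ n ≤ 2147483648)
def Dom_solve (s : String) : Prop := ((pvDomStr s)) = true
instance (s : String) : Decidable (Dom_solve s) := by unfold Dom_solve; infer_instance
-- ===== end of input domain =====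

-- B replaces A's accumulator/length-flag loop and alphabet search by a zip scan with slicing
-- and a closed-form choice of the inserted letter; both raise on "" (excluded by Pre_solve).


-- ===== PORT A =====
-- alpha = 'abcdefghijklmnopqrstuvwxyz'
def pvAlpha : List Char :=
  ['a','b','c','d','e','f','g','h','i','j','k','l','m',
   'n','o','p','q','r','s','t','u','v','w','x','y','z']

-- add_random's for-loop: pred/succ are Python strings (possibly empty), kept as List Char
def pvAddGo (s pred succ : List Char) : List Char → List Char
  | [] => s
  | i :: rest => if [i] ≠ pred ∧ [i] ≠ succ then s ++ [i] else pvAddGo s pred succ rest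

def pvAddRandom (s pred succ : List Char) : List Char := pvAddGo s pred succ pvAlpha

-- A's for i in range(len(s)-1) with break: structural recursion over the same pairs
def pvLoopA (acc : List Char) : List Char → List Char
  | a :: b :: rest =>
      if a = b then pvAddRandom (acc ++ [a]) [a] [b] ++ (b :: rest)
      else pvLoopA (acc ++ [a]) (b :: rest)
  | _ => acc

def solve (s : String) : String :=
  let cs := s.toList
  if cs.length = 1 then
    (pvAddRandom ([] ++ cs) cs []).asString
  else
    let ns := pvLoopA [] cs
    if ns.length ≠ cs.length + 1 then
      match cs.getLast? with          -- s[-1]; none = IndexError (outside Pre_solve)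
      | some c => (pvAddRandom (ns ++ [c]) [c] []).asString
      | none => ""
    else ns.asString

-- ===== PORT B =====
def pvPick (c : Char) : Char := if c = 'a' then 'b' else 'a'

-- B's 'for j,(a,b) in enumerate(zip(s, s[1:])): if a == b: return …'
def pvFindDup : List Char → Nat → Option (Nat × Char)
  | a :: b :: rest, j => if a = b then some (j, a) else pvFindDup (b :: rest) (j + 1)
  | _, _ => none

def solve_alt (s : String) : String :=
  let cs := s.toList
  match pvFindDup cs 0 with
  | some (j, a) => (cs.take (j + 1) ++ [pvPick a] ++ cs.drop (j + 1)).asString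
  | none =>
    match cs.getLast? with            -- s[-1]; none = IndexError (outside Pre_solve)
    | some c => (cs ++ [pvPick c]).asString
    | none => ""

-- ===== PRECONDITION & SPEC =====
-- Pre_ excludes only the empty string, on which both Pythons raise IndexError (s[-1]).
def Pre_solve (s : String) : Prop := s ≠ ""
instance (s : String) : Decidable (Pre_solve s) := by unfold Pre_solve; infer_instance
def pvWitness_solve : String := "aab"

def Spec_solve (s : String) (out : String) : Prop := out = solve_alt s
instance (s : String) (out : String) : Decidable (Spec_solve s out) := by unfold Spec_solve; infer_instance

-- ===== CLAIM (what is proved, stated in full; the proofs are below) =====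
def Claim_equal_solve : Prop := ∀ (s : String), Dom_solve s → Pre_solve s → Spec_solve s (solve s)

-- ===== LEMMAS AND PROOFS =====

theorem pvAddGo_single (x : List Char) (a : Char) :
    pvAddGo x [a] [a] pvAlpha = x ++ [pvPick a] := by
  by_cases h : a = 'a'
  · subst h; simp [pvAlpha, pvAddGo, pvPick]
  · have h' : ¬ ('a' = a) := fun e => h e.symm
    simp [pvAlpha, pvAddGo, pvPick, h, h']

theorem pvAddGo_empty (x : List Char) (a : Char) :
    pvAddGo x [a] [] pvAlpha = x ++ [pvPick a] := by
  by_cases h : a = 'a'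
  · subst h; simp [pvAlpha, pvAddGo, pvPick]
  · have h' : ¬ ('a' = a) := fun e => h e.symm
    simp [pvAlpha, pvAddGo, pvPick, h, h']

theorem pvFindDup_shift (cs : List Char) (j : Nat) :
    pvFindDup cs j = (pvFindDup cs 0).map (fun p => (p.1 + j, p.2)) := by
  induction cs generalizing j with
  | nil => simp [pvFindDup]
  | cons a t ih =>
    cases t with
    | nil => simp [pvFindDup]
    | cons b rest =>
      by_cases h : a = b
      · simp [pvFindDup, h]
      · simp only [pvFindDup, if_neg h]
        rw [ih (j + 1), ih 1]
        cases pvFindDup (b :: rest) 0 with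
        | none => simp
        | some p => simp; omega

theorem pvFindDup_lt (cs : List Char) (j : Nat) (a : Char)
    (h : pvFindDup cs 0 = some (j, a)) : j + 1 < cs.length := by
  induction cs generalizing j a with
  | nil => simp [pvFindDup] at h
  | cons x t ih =>
    cases t with
    | nil => simp [pvFindDup] at h
    | cons b rest =>
      by_cases hx : x = b
      · simp [pvFindDup, hx] at h
        simp [List.length_cons]
        omega
      · simp only [pvFindDup, if_neg hx] at h
        rw [pvFindDup_shift (b :: rest) 1] at h
        cases hfd : pvFindDup (b :: rest) 0 with
        | none => rw [hfd] at h; simp at h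
        | some p =>
          rw [hfd] at h
          simp at h
          obtain ⟨h1, h2⟩ := h
          have := ih p.1 p.2 hfd
          simp [List.length_cons] at this ⊢
          omega

theorem pvLoopA_eq (cs acc : List Char) :
    pvLoopA acc cs =
      match pvFindDup cs 0 with
      | some (j, a) => acc ++ cs.take (j + 1) ++ [pvPick a] ++ cs.drop (j + 1)
      | none => acc ++ cs.dropLast := by
  induction cs generalizing acc with
  | nil => simp [pvLoopA, pvFindDup]
  | cons a t ih =>
    cases t with
    | nil => simp [pvLoopA, pvFindDup]
    | cons b rest =>
      by_cases h : a = b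
      · subst h
        simp [pvLoopA, pvFindDup, pvAddRandom, pvAddGo_single]
      · simp only [pvLoopA, if_neg h, ih, pvFindDup]
        rw [pvFindDup_shift (b :: rest) 1]
        cases pvFindDup (b :: rest) 0 with
        | none => simp [List.dropLast_cons_of_ne_nil]
        | some p => simp [List.take_succ_cons, List.drop_succ_cons]

-- ===== VERDICT (by name: the statement is the Claim_ definition above) =====
theorem solve_spec : Claim_equal_solve := by
  intro s _ hpre
  have hcs : s.toList ≠ [] := fun e => hpre (String.toList_eq_nil_iff.mp e)
  unfold Spec_solve solve solve_alt
  simp only []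
  by_cases h1 : s.toList.length = 1
  · -- single-character string
    obtain ⟨c, hc⟩ : ∃ c, s.toList = [c] := by
      cases hl : s.toList with
      | nil => simp [hl] at h1
      | cons x t =>
        cases t with
        | nil => exact ⟨x, rfl⟩
        | cons y u => simp [hl] at h1
    rw [if_pos h1, hc]
    simp [pvFindDup, pvAddRandom, pvAddGo_empty]
  · rw [if_neg h1, pvLoopA_eq]
    cases hfd : pvFindDup s.toList 0 with
    | some p =>
      obtain ⟨j, a⟩ := p
      have hlt := pvFindDup_lt _ _ _ hfd
      have hlen : (s.toList.take (j + 1) ++ [pvPick a] ++ s.toList.drop (j + 1)).length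
          = s.toList.length + 1 := by
        simp <;> omega
      simp [hlen]
    | none =>
      have hlen : (([] : List Char) ++ s.toList.dropLast).length ≠ s.toList.length + 1 := by
        simp [List.length_dropLast] <;> omega
      rw [if_pos hlen]
      cases hl : s.toList.getLast? with
      | none => exact absurd (List.getLast?_eq_none_iff.mp hl) hcs
      | some c =>
        simp only [pvAddRandom, pvAddGo_empty, List.nil_append]
        obtain ⟨t, ht⟩ := List.getLast?_eq_some_iff.mp hl
        rw [ht]
        simp
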